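-- pv_equiv track=rewrite | github.com/Lewis-Base/D3Bot | v01/DD_v01_send.py | create_send_list
-- ===== SOURCE A (Python) =====
-- def create_send_list(poap_links_list, attendee_list, db_list):
--
--     send_list = []
--
--     k = 0
--
--     for i in attendee_list:
--
--         for j in db_list:
--
--             if i.lower() == (((j[1]).split())[0]).lower():
--
--                 send_list.append([j[3], poap_links_list[k]])
--
--         k += 1
--
--     return(send_list)
-- ===== SOURCE B (Python) =====
-- def create_send_list(poap_links_list, attendee_list, db_list):
--     # Group the db rows once by their lowercased first-word key, then walk the
--     # attendees and emit each attendee's group directly (no inner db scan).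
--     if not attendee_list:
--         return []  # nothing to send; don't build the index
--     index = {}
--     for j in db_list:
--         index.setdefault(j[1].split()[0].lower(), []).append(j)
--     send_list = []
--     for k, i in enumerate(attendee_list):
--         for j in index.get(i.lower(), []):
--             send_list.append([j[3], poap_links_list[k]])
--     return send_list
-- ===== Notes on version B (the rewrite author's own statement) =====
-- stated objective: alternative
-- what changed: B groups the db rows once into a dict keyed by the lowercased first word of j[1] and then emits each attendee's group directly, replacing A's per-attendee rescan of the whole db list.
import Mathlib
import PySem

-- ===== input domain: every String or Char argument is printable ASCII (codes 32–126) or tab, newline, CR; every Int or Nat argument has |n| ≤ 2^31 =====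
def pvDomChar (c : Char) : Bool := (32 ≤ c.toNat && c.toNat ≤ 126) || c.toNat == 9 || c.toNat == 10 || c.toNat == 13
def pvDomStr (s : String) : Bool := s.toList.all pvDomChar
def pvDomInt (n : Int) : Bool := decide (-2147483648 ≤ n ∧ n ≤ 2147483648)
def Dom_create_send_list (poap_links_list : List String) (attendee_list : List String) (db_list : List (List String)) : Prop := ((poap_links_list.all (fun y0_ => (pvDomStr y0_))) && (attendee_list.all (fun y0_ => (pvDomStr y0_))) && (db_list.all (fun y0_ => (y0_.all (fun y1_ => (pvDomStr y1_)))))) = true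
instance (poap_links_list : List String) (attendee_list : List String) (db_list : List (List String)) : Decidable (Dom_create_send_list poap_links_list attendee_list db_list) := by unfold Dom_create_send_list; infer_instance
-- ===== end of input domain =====

-- B replaces A's per-attendee rescan of db_list with one grouping pass into a dict, then emits each attendee's group (and returns [] outright when there are no attendees).


-- shared helper: j[1].split()[0].lower()  (Pre_ guarantees both indexings are in range wherever a port's Python evaluates them)
def csl_key (j : List String) : String :=
  PySem.Str.lower (PySem.List.pyGetD (PySem.Str.split₀ (PySem.List.pyGetD j 1 "")) 0 "")

-- ===== PORT A =====
def create_send_list (poap_links_list : List String) (attendee_list : List String) (db_list : List (List String)) : List (List String) :=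
  (attendee_list.foldl
    (fun (acc : List (List String) × Int) i =>
      (db_list.foldl
        (fun send_list j =>
          if PySem.Str.lower i == csl_key j then
            send_list ++ [[PySem.List.pyGetD j 3 "", PySem.List.pyGetD poap_links_list acc.2 ""]]
          else send_list) acc.1,
       acc.2 + 1))
    (([] : List (List String)), (0 : Int))).1

-- ===== PORT B =====
def create_send_list_alt (poap_links_list : List String) (attendee_list : List String) (db_list : List (List String)) : List (List String) :=
  if attendee_list = [] then []
  else
    let index : PySem.Dict String (List (List String)) :=
      db_list.foldl (fun d j => d.modify (csl_key j) [] (· ++ [j])) PySem.Dict.empty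
    (PySem.List.enumerate attendee_list 0).foldl
      (fun send_list p =>
        (index.getD (PySem.Str.lower p.2) []).foldl
          (fun send_list j =>
            send_list ++ [[PySem.List.pyGetD j 3 "", PySem.List.pyGetD poap_links_list p.1 ""]])
          send_list)
      []

-- ===== PRECONDITION & SPEC =====
-- Pre_ excludes exactly the inputs on which Python A raises IndexError: with at least one attendee,
-- a row shorter than 2 or a row whose j[1] has no words; or a match against a row shorter than 4 or
-- at an attendee position past the end of poap_links_list.
def Pre_create_send_list (poap_links_list : List String) (attendee_list : List String) (db_list : List (List String)) : Prop :=
  (attendee_list ≠ [] → ∀ j ∈ db_list, 2 ≤ j.length ∧ PySem.Str.split₀ (PySem.List.pyGetD j 1 "") ≠ []) ∧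
  (∀ p ∈ PySem.List.enumerate attendee_list 0, ∀ j ∈ db_list,
     PySem.Str.lower p.2 = csl_key j → 4 ≤ j.length ∧ p.1 < (poap_links_list.length : Int))
instance (poap_links_list : List String) (attendee_list : List String) (db_list : List (List String)) : Decidable (Pre_create_send_list poap_links_list attendee_list db_list) := by unfold Pre_create_send_list; infer_instance

def pvWitness_create_send_list : List String × List String × List (List String) :=
  (["http://poap/1"], ["al"], [["1", "Al Smith", "x", "al@x.io"]])

def Spec_create_send_list (poap_links_list : List String) (attendee_list : List String) (db_list : List (List String)) (out : List (List String)) : Prop := out = create_send_list_alt poap_links_list attendee_list db_list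
instance (poap_links_list : List String) (attendee_list : List String) (db_list : List (List String)) (out : List (List String)) : Decidable (Spec_create_send_list poap_links_list attendee_list db_list out) := by unfold Spec_create_send_list; infer_instance

-- ===== CLAIM (what is proved, stated in full; the proofs are below) =====
def Claim_equal_create_send_list : Prop := ∀ (poap_links_list : List String) (attendee_list : List String) (db_list : List (List String)), Dom_create_send_list poap_links_list attendee_list db_list → Pre_create_send_list poap_links_list attendee_list db_list → Spec_create_send_list poap_links_list attendee_list db_list (create_send_list poap_links_list attendee_list db_list)

-- ===== LEMMAS AND PROOFS =====

-- A's counter loop is a fold over the enumerated attendee list.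
theorem csl_pairfold {X : Type} (g : List X → Int → String → List X) :
    ∀ (att : List String) (s0 : List X) (k0 : Int),
      (att.foldl (fun (acc : List X × Int) i => (g acc.1 acc.2 i, acc.2 + 1)) (s0, k0)).1
        = (PySem.List.enumerate att k0).foldl (fun s p => g s p.1 p.2) s0 := by
  intro att
  induction att with
  | nil => intro s0 k0; simp [PySem.List.enumerate_nil]
  | cons a t ih => intro s0 k0; simp [PySem.List.enumerate_cons, List.foldl_cons, ih]

theorem csl_beq_comm (a b : String) : (a == b) = (b == a) := by
  by_cases h : a = b
  · simp [h]
  · simp [h, Ne.symm h]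

theorem create_send_list_eq_alt (poap_links_list attendee_list : List String)
    (db_list : List (List String)) :
    create_send_list poap_links_list attendee_list db_list
      = create_send_list_alt poap_links_list attendee_list db_list := by
  unfold create_send_list create_send_list_alt
  rcases attendee_list with _ | ⟨a, t⟩
  · simp
  rw [if_neg (by simp)]
  rw [csl_pairfold (fun s k i =>
        db_list.foldl (fun send_list j =>
          if PySem.Str.lower i == csl_key j then
            send_list ++ [[PySem.List.pyGetD j 3 "", PySem.List.pyGetD poap_links_list k ""]]
          else send_list) s)]
  apply PySem.List.foldl_congr_mem
  intro s p _
  rw [PySem.List.foldl_append_if, PySem.List.foldl_append_singleton_eq_map]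
  have hgroup :
      (db_list.foldl (fun d j => d.modify (csl_key j) [] (· ++ [j]))
          (PySem.Dict.empty : PySem.Dict String (List (List String)))).getD (PySem.Str.lower p.2) []
        = db_list.filter (fun j => PySem.Str.lower p.2 == csl_key j) := by
    have hmap : db_list.foldl (fun d j => d.modify (csl_key j) [] (· ++ [j]))
          (PySem.Dict.empty : PySem.Dict String (List (List String)))
        = (db_list.map (fun j => (csl_key j, j))).foldl
            (fun d q => d.modify q.1 [] (· ++ [q.2])) PySem.Dict.empty := by
      rw [List.foldl_map]
    rw [hmap, PySem.Dict.getD_foldl_modify_append]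
    simp [List.filter_map, Function.comp_def, csl_beq_comm]
  rw [hgroup]

-- ===== VERDICT (by name: the statement is the Claim_ definition above) =====
theorem create_send_list_spec : Claim_equal_create_send_list := by
  intro pls att db _ _
  unfold Spec_create_send_list
  exact create_send_list_eq_alt pls att db
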